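-- pv_equiv track=rewrite | github.com/Mikuu/homework | src/math/multiplication.py | generate_lines
-- ===== SOURCE A (Python) =====
-- def generate_lines(problems=[], column=3, spliter=' '*10):
--     lines = []
--
--     while len(problems):
--         problems_in_line = []
--
--         for _ in range(column):
--             if len(problems):
--                 problems_in_line.append(problems.pop())
--
--         lines.append(spliter.join(problems_in_line))
--
--     return lines
-- ===== SOURCE B (Python) =====
-- def generate_lines(problems=[], column=3, spliter=' '*10):
--     # Drain the whole input in one pass (emptying `problems` like A does), then
--     # chunk the reversed buffer by stride slicing.
--     rev = [problems.pop() for _ in range(len(problems))]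
--     return [spliter.join(rev[i:i + column]) for i in range(0, len(rev), column)]
-- ===== Notes on version B (the rewrite author's own statement) =====
-- stated objective: simpler
-- what changed: A's interleaved nested while/for with pop-and-append is replaced by two separate passes: one pop-comprehension that drains the list into a reversed buffer, then a stride-slicing comprehension that chunks it into joined lines.
-- outside the precondition, e.g. on generate_lines([], 0, ' '): A returns [], B raises ValueError
import Mathlib
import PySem

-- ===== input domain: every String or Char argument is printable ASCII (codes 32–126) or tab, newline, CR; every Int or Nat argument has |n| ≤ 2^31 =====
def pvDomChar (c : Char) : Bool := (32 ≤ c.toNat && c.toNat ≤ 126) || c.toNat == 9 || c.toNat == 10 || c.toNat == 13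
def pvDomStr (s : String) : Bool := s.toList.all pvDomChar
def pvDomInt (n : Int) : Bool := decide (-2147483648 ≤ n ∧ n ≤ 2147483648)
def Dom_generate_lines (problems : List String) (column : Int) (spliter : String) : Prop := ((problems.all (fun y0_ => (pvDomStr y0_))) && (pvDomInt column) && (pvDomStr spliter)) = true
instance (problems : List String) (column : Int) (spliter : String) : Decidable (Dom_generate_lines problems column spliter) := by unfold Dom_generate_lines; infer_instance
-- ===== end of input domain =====

-- B drains the input into a reversed buffer in one pass, then stride-slices it into
-- lines (two separate passes instead of A's interleaved nested while/for): simpler.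
-- Both A and B empty the `problems` argument in place; the equivalence proved here
-- is about the RETURN value only.

-- ===== PORT A =====
-- inner `for _ in range(column)` loop of A: pops up to `n` items from the end of
-- `ps`, returning (items in pop order, remaining list)
def glA_inner : Nat → List String → List String × List String
  | 0, ps => ([], ps)
  | n + 1, ps =>
    if ps.isEmpty then ([], ps)
    else
      let x := ps.getLast!
      let (items, rest) := glA_inner n ps.dropLast
      (x :: items, rest)

-- outer `while len(problems)` loop of A; fuel bounds the iterations (inside
-- Pre_ each iteration pops at least one item, so `length + 1` fuel suffices)
def glA_loop : Nat → List String → Int → String → List String → List String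
  | 0, _, _, _, lines => lines
  | fuel + 1, ps, column, spliter, lines =>
    if ps.isEmpty then lines
    else
      let (items, rest) := glA_inner column.toNat ps
      glA_loop fuel rest column spliter (lines ++ [PySem.Str.join spliter items])

def generate_lines (problems : List String) (column : Int) (spliter : String) : List String :=
  glA_loop (problems.length + 1) problems column spliter []

-- ===== PORT B =====
def generate_lines_alt (problems : List String) (column : Int) (spliter : String) : List String :=
  -- rev = [problems.pop() for _ in range(len(problems))]
  let rev := problems.reverse
  -- [spliter.join(rev[i:i+column]) for i in range(0, len(rev), column)]
  (PySem.List.pyRange 0 (rev.length : Int) column).map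
    (fun i => PySem.Str.join spliter (PySem.List.slice rev (some i) (some (i + column))))

-- ===== PRECONDITION & SPEC =====
-- Pre_ excludes column ≤ 0 with nonempty problems, where A loops forever, and
-- column = 0 with empty problems, where B's range step of 0 raises ValueError
-- while A returns [].
def Pre_generate_lines (problems : List String) (column : Int) (spliter : String) : Prop :=
  1 ≤ column ∨ (problems = [] ∧ column ≠ 0)
instance (problems : List String) (column : Int) (spliter : String) : Decidable (Pre_generate_lines problems column spliter) := by unfold Pre_generate_lines; infer_instance

def pvWitness_generate_lines : List String × Int × String :=
  (["1 * 2 = 2", "3 * 4 = 12", "5 * 6 = 30", "7 * 8 = 56"], 3, "          ")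

def Spec_generate_lines (problems : List String) (column : Int) (spliter : String) (out : List String) : Prop := out = generate_lines_alt problems column spliter
instance (problems : List String) (column : Int) (spliter : String) (out : List String) : Decidable (Spec_generate_lines problems column spliter out) := by unfold Spec_generate_lines; infer_instance

-- ===== CLAIM (what is proved, stated in full; the proofs are below) =====
def Claim_equal_generate_lines : Prop := ∀ (problems : List String) (column : Int) (spliter : String), Dom_generate_lines problems column spliter → Pre_generate_lines problems column spliter → Spec_generate_lines problems column spliter (generate_lines problems column spliter)

-- ===== LEMMAS AND PROOFS =====

-- the common chunking scheme both programs compute: lines of `c` items (last one shorter)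
def chunkRec (c : Nat) (sp : String) : List String → List String
  | [] => []
  | x :: xs => PySem.Str.join sp ((x :: xs).take c) :: chunkRec c sp (xs.drop (c - 1))
  termination_by l => l.length
  decreasing_by
    simp only [List.length_drop, List.length_cons]
    omega

lemma pyRange_pos_nil (a b s : Int) (hs : 0 < s) (h : b ≤ a) :
    PySem.List.pyRange a b s = [] := by
  rw [PySem.List.pyRange_of_pos a b hs]
  simp [Int.not_lt.mpr h]

lemma pyRange_pos_cons (a b s : Int) (hs : 0 < s) (h : a < b) :
    PySem.List.pyRange a b s = a :: PySem.List.pyRange (a + s) b s := by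
  rw [PySem.List.pyRange_of_pos a b hs, PySem.List.pyRange_of_pos (a + s) b hs]
  have hcnt : (if a < b then ((b - a + s - 1) / s).toNat else 0)
      = (if a + s < b then ((b - (a + s) + s - 1) / s).toNat else 0) + 1 := by
    rw [if_pos h]
    by_cases h2 : a + s < b
    · rw [if_pos h2]
      have e1 : b - a + s - 1 = (b - a - 1) + 1 * s := by ring
      have e2 : b - (a + s) + s - 1 = b - a - 1 - s + 1 * s := by ring
      rw [e1, e2, Int.add_mul_ediv_right _ _ (by omega : s ≠ 0),
        Int.add_mul_ediv_right _ _ (by omega : s ≠ 0)]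
      have e3 : b - a - 1 - s = (b - a - 1) - 1 * s := by ring
      rw [e3, Int.sub_mul_ediv_right _ _ (by omega : s ≠ 0)]
      have hnn : 0 ≤ (b - a - 1) / s := Int.ediv_nonneg (by omega) (by omega)
      omega
    · rw [if_neg h2]
      have : (b - a + s - 1) / s = 1 := by
        have e1 : b - a + s - 1 = (b - a - 1) + 1 * s := by ring
        rw [e1, Int.add_mul_ediv_right _ _ (by omega : s ≠ 0)]
        have : (b - a - 1) / s = 0 := Int.ediv_eq_zero_of_lt (by omega) (by omega)
        omega
      simp [this]
  rw [hcnt, List.range_succ_eq_map, List.map_cons, List.map_map]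
  simp only [Nat.cast_zero, mul_zero, add_zero]
  congr 1
  apply List.map_congr_left
  intro k _
  simp only [Function.comp_apply]
  push_cast
  ring

-- the inner pop loop takes the last `n` items (in pop order) and drops them
lemma glA_inner_eq (n : Nat) (ps : List String) :
    glA_inner n ps = (ps.reverse.take n, (ps.reverse.drop n).reverse) := by
  induction n generalizing ps with
  | zero => simp [glA_inner]
  | succ m ih =>
    rcases eq_or_ne ps [] with rfl | hne
    · simp [glA_inner]
    · have hg : ps.getLast! = ps.getLast hne := by
        cases ps with
        | nil => exact absurd rfl hne
        | cons x xs => rw [List.getLast!]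
      have hrev : ps.reverse = ps.getLast! :: ps.dropLast.reverse := by
        rw [hg]
        conv_lhs => rw [← List.dropLast_concat_getLast hne]
        simp
      simp only [glA_inner, List.isEmpty_eq_false_iff.mpr hne, ih, hrev]
      simp

-- A's outer loop, with enough fuel and column ≥ 1, computes chunkRec of the reverse
lemma glA_loop_eq (column : Int) (hc : 1 ≤ column) (spliter : String) :
    ∀ (fuel : Nat) (ps lines : List String), ps.length ≤ fuel →
      glA_loop fuel ps column spliter lines
        = lines ++ chunkRec column.toNat spliter ps.reverse := by
  intro fuel
  induction fuel with
  | zero =>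
    intro ps lines hle
    have : ps = [] := List.length_eq_zero_iff.mp (Nat.le_zero.mp hle)
    subst this
    simp [glA_loop, chunkRec]
  | succ m ih =>
    intro ps lines hle
    rcases eq_or_ne ps [] with rfl | hne
    · simp [glA_loop, chunkRec]
    · have hc1 : 1 ≤ column.toNat := by omega
      simp only [glA_loop, List.isEmpty_eq_false_iff.mpr hne, glA_inner_eq]
      rw [ih _ _ (by
        simp only [List.length_reverse, List.length_drop]
        have : ps.length ≠ 0 := by simpa using hne
        omega)]
      have hrne : ps.reverse ≠ [] := by simpa using hne
      obtain ⟨x, xs, hxs⟩ := List.exists_cons_of_ne_nil hrne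
      rw [hxs]
      have hdrop : (x :: xs).drop column.toNat = xs.drop (column.toNat - 1) := by
        obtain ⟨k, hk⟩ : ∃ k, column.toNat = k + 1 := ⟨column.toNat - 1, by omega⟩
        simp [hk]
      rw [chunkRec, ← hdrop, List.reverse_reverse, List.append_assoc]
      simp

-- B's stride-sliced comprehension also computes chunkRec, for any suffix of the buffer
lemma B_map_eq (column : Int) (hc : 1 ≤ column) (spliter : String) :
    ∀ (n : Nat) (r full : List String) (a : Nat), r.length ≤ n →
      full.drop a = r → a ≤ full.length →
      (PySem.List.pyRange (a : Int) (full.length : Int) column).map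
          (fun i => PySem.Str.join spliter (PySem.List.slice full (some i) (some (i + column))))
        = chunkRec column.toNat spliter r := by
  intro n
  induction n with
  | zero =>
    intro r full a hle hdrop ha
    have hr : r = [] := List.length_eq_zero_iff.mp (Nat.le_zero.mp hle)
    subst hr
    have hfa : full.length = a := by
      have := congrArg List.length hdrop
      simp at this
      omega
    rw [hfa, pyRange_pos_nil _ _ _ (by omega) le_rfl]
    simp [chunkRec]
  | succ m ih =>
    intro r full a hle hdrop ha
    rcases eq_or_ne r [] with rfl | hne
    · have hfa : full.length = a := by
        have := congrArg List.length hdrop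
        simp at this
        omega
      rw [hfa, pyRange_pos_nil _ _ _ (by omega) le_rfl]
      simp [chunkRec]
    · have hlen : full.length = a + r.length := by
        have := congrArg List.length hdrop
        simp at this
        omega
      have halt : (a : Int) < (full.length : Int) := by
        have : r.length ≠ 0 := by simpa using hne
        omega
      rw [pyRange_pos_cons _ _ _ (by omega) halt, List.map_cons]
      -- head slice
      have hslice : PySem.List.slice full (some (a : Int)) (some ((a : Int) + column))
          = r.take column.toNat := by
        rw [PySem.List.slice_toNat full (by omega) (by omega)]
        have h1 : ((a : Int) + column).toNat - ((a : Int)).toNat = column.toNat := by omega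
        have h2 : ((a : Int)).toNat = a := by omega
        rw [h1, h2, hdrop]
      -- tail
      obtain ⟨x, xs, hxs⟩ := List.exists_cons_of_ne_nil hne
      have hcast : (a : Int) + column = ((a + column.toNat : Nat) : Int) := by push_cast; omega
      have htail : (PySem.List.pyRange ((a : Int) + column) (full.length : Int) column).map
          (fun i => PySem.Str.join spliter (PySem.List.slice full (some i) (some (i + column))))
          = chunkRec column.toNat spliter (r.drop column.toNat) := by
        rw [hcast]
        by_cases hbig : a + column.toNat ≤ full.length
        · apply ih
          · have hct : 1 ≤ column.toNat := by omega
            simp only [List.length_drop]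
            have hr0 : r.length ≠ 0 := by simpa using hne
            omega
          · rw [← List.drop_drop, hdrop]
          · exact hbig
        · rw [pyRange_pos_nil _ _ _ (by omega) (by omega)]
          have hnil : r.drop column.toNat = [] := by
            rw [List.drop_eq_nil_iff]
            omega
          rw [hnil]
          simp [chunkRec]
      rw [htail, hslice, hxs, chunkRec]
      have hdropc : (x :: xs).drop column.toNat = xs.drop (column.toNat - 1) := by
        obtain ⟨k, hk⟩ : ∃ k, column.toNat = k + 1 := ⟨column.toNat - 1, by omega⟩
        simp [hk]
      rw [hdropc]

lemma pyRange_self_nil (s : Int) (a : Int) : PySem.List.pyRange a a s = [] := by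
  simp [PySem.List.pyRange]

-- ===== VERDICT (by name: the statement is the Claim_ definition above) =====
theorem generate_lines_spec : Claim_equal_generate_lines := by
  intro problems column spliter _ hpre
  unfold Spec_generate_lines generate_lines generate_lines_alt
  rcases hpre with hc | ⟨rfl, hc0⟩
  · have hB : (let rev := problems.reverse;
        (PySem.List.pyRange 0 (rev.length : Int) column).map
          (fun i => PySem.Str.join spliter (PySem.List.slice rev (some i) (some (i + column)))))
        = chunkRec column.toNat spliter problems.reverse := by
      have h := B_map_eq column hc spliter problems.reverse.length problems.reverse
        problems.reverse 0 le_rfl (by simp) (by simp)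
      simpa using h
    rw [hB, glA_loop_eq column hc spliter _ _ _ (by omega)]
    simp
  · simp [glA_loop, pyRange_self_nil]
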